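-- pv_equiv track=rewrite | github.com/Sukhrobjon/Codesignal-Challenges | Arcade/Intr/EdgeOfOcean/matrixElementSum.py | matrixElementSum
-- ===== SOURCE A (Python) =====
-- def matrixElementSum(matrix):
--     n = 0
--     for row in range(len(matrix)):
--         for colum in range(len(matrix[row])):
--             if matrix[row][colum]== 0:
--                 break
--             n +=matrix[row][colum]
--
--     return n
-- ===== SOURCE B (Python) =====
-- def matrixElementSum(matrix):
--     grand = sum(map(sum, matrix))
--     excess = sum(sum(row[row.index(0):]) for row in matrix if 0 in row)
--     return grand - excess
-- ===== Notes on version B (the rewrite author's own statement) =====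
-- stated objective: alternative
-- what changed: B works by subtraction in two staged passes: it sums every element of the matrix with sum(map(sum, ...)), then subtracts the sum of each row's suffix starting at its first zero, instead of A's single index-driven pass that accumulates prefix elements and breaks at the first zero.
import Mathlib
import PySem

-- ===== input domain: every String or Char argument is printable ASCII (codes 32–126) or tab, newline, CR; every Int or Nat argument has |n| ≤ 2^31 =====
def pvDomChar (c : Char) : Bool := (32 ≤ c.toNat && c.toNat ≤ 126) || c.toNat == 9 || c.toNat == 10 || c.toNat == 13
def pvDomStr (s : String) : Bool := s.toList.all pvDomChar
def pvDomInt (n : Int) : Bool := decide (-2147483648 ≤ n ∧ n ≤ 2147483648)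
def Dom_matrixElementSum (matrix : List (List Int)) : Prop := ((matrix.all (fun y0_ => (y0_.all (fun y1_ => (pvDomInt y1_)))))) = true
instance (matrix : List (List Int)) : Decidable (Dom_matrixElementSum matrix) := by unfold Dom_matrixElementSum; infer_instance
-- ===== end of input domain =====

-- B computes the result by subtraction in two staged passes (grand total minus suffixes after each row's first zero) instead of A's break-at-zero accumulation (objective: alternative).


-- ===== PORT A =====
-- inner 'for colum in range(len(row)): if row[colum]==0: break; n += row[colum]'
def pvAInner (row : List Int) (i : Nat) (n : Int) : Int :=
  if h : i < row.length then
    if row[i] = 0 then n else pvAInner row (i + 1) (n + row[i])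
  else n
termination_by row.length - i

def matrixElementSum (matrix : List (List Int)) : Int :=
  matrix.foldl (fun n row => pvAInner row 0 n) 0

-- ===== PORT B =====
-- grand = sum(map(sum, matrix)); excess = sum(sum(row[row.index(0):]) for row in matrix if 0 in row)
-- (inside the generator '0 in row' holds, so row.index(0) is index?.getD 0 there)
def matrixElementSum_alt (matrix : List (List Int)) : Int :=
  let grand := (matrix.map List.sum).sum
  let excess := ((matrix.filter (fun row => row.contains 0)).map
      (fun row => (row.drop ((PySem.List.index? row 0).getD 0)).sum)).sum
  grand - excess

-- ===== PRECONDITION & SPEC =====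
def Spec_matrixElementSum (matrix : List (List Int)) (out : Int) : Prop := out = matrixElementSum_alt matrix
instance (matrix : List (List Int)) (out : Int) : Decidable (Spec_matrixElementSum matrix out) := by unfold Spec_matrixElementSum; infer_instance

-- ===== CLAIM (what is proved, stated in full; the proofs are below) =====
def Claim_equal_matrixElementSum : Prop := ∀ (matrix : List (List Int)), Dom_matrixElementSum matrix → Spec_matrixElementSum matrix (matrixElementSum matrix)

-- ===== LEMMAS AND PROOFS =====

-- structural version of A's inner loop
def pvAW : List Int → Int → Int
  | [], n => n
  | x :: xs, n => if x = 0 then n else pvAW xs (n + x)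

theorem pvAInner_eq_pvAW (row : List Int) (i : Nat) (n : Int) :
    pvAInner row i n = pvAW (row.drop i) n := by
  by_cases h : i < row.length
  · rw [pvAInner, dif_pos h, List.drop_eq_getElem_cons h]
    by_cases hz : row[i] = 0
    · simp [pvAW, hz]
    · rw [if_neg hz]
      rw [pvAInner_eq_pvAW row (i + 1) (n + row[i])]
      simp [pvAW, hz]
  · rw [pvAInner, dif_neg h, List.drop_eq_nil_of_le (by omega)]
    rfl
termination_by row.length - i

-- per-row value of B's subtraction scheme
def pvRowB (row : List Int) : Int :=
  row.sum - (if row.contains 0 then (row.drop ((PySem.List.index? row 0).getD 0)).sum else 0)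

theorem pvAW_eq_rowB (l : List Int) (n : Int) : pvAW l n = n + pvRowB l := by
  induction l generalizing n with
  | nil => simp [pvAW, pvRowB]
  | cons x xs ih =>
    by_cases hx : x = 0
    · subst hx
      have hidx : PySem.List.index? ((0 : Int) :: xs) (0 : Int) = some 0 :=
        PySem.List.index?_cons_self (0 : Int) xs
      have h1 : pvAW ((0 : Int) :: xs) n = n := by simp [pvAW]
      rw [h1, pvRowB, hidx]
      simp
    · have hidx := PySem.List.index?_cons_of_ne (x := x) (v := (0 : Int)) xs hx
      rw [pvRowB, List.contains_cons]
      have hxne : ((0 : Int) == x) = false :=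
        beq_eq_false_iff_ne.mpr (fun h => hx h.symm)
      rw [hxne]
      simp only [pvAW, if_neg hx, ih, Bool.false_or, List.sum_cons]
      by_cases hc : xs.contains 0
      · rw [if_pos hc]
        cases hk : PySem.List.index? xs (0 : Int) with
        | none =>
          exfalso
          have := (PySem.List.index?_eq_none_iff (xs := xs) (v := (0 : Int))).mp hk
          simp at hc
          exact this hc
        | some k =>
          rw [hk] at hidx
          rw [pvRowB, if_pos hc, hk, hidx]
          have h2 : List.drop ((Option.map (fun j => j + 1) (some k)).getD 0) (x :: xs)
              = List.drop k xs := by simp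
          rw [h2]
          simp only [Option.getD_some]
          ring
      · rw [if_neg hc, pvRowB, if_neg hc]
        ring

theorem pvFoldA_eq (matrix : List (List Int)) (n : Int) :
    matrix.foldl (fun n row => pvAInner row 0 n) n = n + (matrix.map pvRowB).sum := by
  induction matrix generalizing n with
  | nil => simp
  | cons r rs ih =>
    simp only [List.foldl_cons, List.map_cons, List.sum_cons]
    rw [ih, pvAInner_eq_pvAW, List.drop_zero, pvAW_eq_rowB]
    ring

theorem pvAlt_eq (matrix : List (List Int)) :
    matrixElementSum_alt matrix = (matrix.map pvRowB).sum := by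
  unfold matrixElementSum_alt
  induction matrix with
  | nil => simp
  | cons r rs ih =>
    simp only [List.map_cons, List.sum_cons, List.filter_cons]
    by_cases hc : r.contains 0
    · rw [if_pos hc]
      simp only [List.map_cons, List.sum_cons]
      rw [pvRowB, if_pos hc]
      simp only at ih
      rw [← ih]
      ring
    · rw [if_neg (by simpa using hc), pvRowB, if_neg hc]
      simp only at ih
      rw [← ih]
      ring

-- ===== VERDICT (by name: the statement is the Claim_ definition above) =====
theorem matrixElementSum_spec : Claim_equal_matrixElementSum := by
  intro matrix _
  unfold Spec_matrixElementSum matrixElementSum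
  rw [pvFoldA_eq, pvAlt_eq]
  simp
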